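-- pv_equiv track=rewrite | github.com/AP-MI-2021/lab-3-MarianMutu | main.py | get_longest_prime_digits
-- ===== SOURCE A (Python) =====
-- def prime_digits(n):
--     """
--     Determina daca un nr  are toate cifrele prime
--     :param n: int
--     :return: true daca n respecta cerinta, false altfel
--     """
--     not_prime = [0, 1, 4, 6, 8, 9]
--     while n != 0:
--         for x in not_prime:
--             if n % 10 == x:
--                 return False
--         n = n // 10
--
--     return True
--
-- def get_longest_prime_digits(lst):
--     """
--     Determina subsecventa cu toate numerele formate din cifre prime.
--     :param lst: int
--     :return:  lista ceruta
--     """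
--     rez2 = []  # rezultatul cerut
--     temp2 = []  # lista temporara
--     for x in lst:
--         if prime_digits(x):
--             temp2.append(x)
--         else:
--             if len(temp2) > len(rez2):
--                 rez2 = temp2[:]
--             temp2.clear()
--
--     return rez2
-- ===== SOURCE B (Python) =====
-- def prime_digits(n):
--     while n != 0:
--         if n % 10 not in (2, 3, 5, 7):
--             return False
--         n = n // 10
--     return True
--
-- def get_longest_prime_digits(lst):
--     best = []
--     i = 0
--     while i < len(lst):
--         if prime_digits(lst[i]):
--             j = i
--             while j < len(lst) and prime_digits(lst[j]):
--                 j += 1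
--             if j - i > len(best):
--                 best = lst[i:j]
--             i = j
--         else:
--             i += 1
--     return best
-- ===== Notes on version B (the rewrite author's own statement) =====
-- stated objective: alternative
-- what changed: B replaces A's one-pass temp-buffer-and-flush accumulation with an index scan that jumps run-by-run: an inner while locates the end of each maximal prime-digit run, which is sliced out in bulk (no per-element appends and temp copies) if longer than the best so far; B also considers the trailing run that A never flushes.
-- intended difference: On lists ending in a prime-digit number A never flushes the trailing run of prime-digit numbers and returns the longest earlier run, while B also considers that trailing run and returns it when it is strictly longer than every earlier run, which is the intended longest all-prime-digit subsequence. — e.g. on get_longest_prime_digits([2]): A returns [], B returns [2]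
import Mathlib
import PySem

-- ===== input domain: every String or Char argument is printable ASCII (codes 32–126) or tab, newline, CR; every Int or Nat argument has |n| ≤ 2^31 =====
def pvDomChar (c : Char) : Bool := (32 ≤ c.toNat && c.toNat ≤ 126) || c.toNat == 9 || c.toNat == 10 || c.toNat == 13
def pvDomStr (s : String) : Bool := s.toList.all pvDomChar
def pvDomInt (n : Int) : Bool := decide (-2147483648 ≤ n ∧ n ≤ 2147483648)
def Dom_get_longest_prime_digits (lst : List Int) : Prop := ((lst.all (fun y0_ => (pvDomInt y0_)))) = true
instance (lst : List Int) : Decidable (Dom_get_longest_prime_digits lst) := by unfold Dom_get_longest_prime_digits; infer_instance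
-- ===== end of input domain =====

-- B scans the list run-by-run with an index and an inner while loop (a different decomposition of
-- the same O(n) task); unlike A it also counts the trailing prime-digit run A never flushes (see D_).

-- ===== PORT A =====
-- prime_digits: 'while n != 0: for x in [0,1,4,6,8,9]: if n % 10 == x: return False; n //= 10; return True'.
-- The while loop is fuel recursion; |n| bounds the number of iterations (each one shrinks |n|),
-- and the fuel-exhausted branch is unreachable, so this is exact.
def primeDigitsFuel : Nat → Int → Bool
  | 0, _ => true
  | fuel+1, n =>
    if n = 0 then true
    else if PySem.Int.mod n 10 = 0 ∨ PySem.Int.mod n 10 = 1 ∨ PySem.Int.mod n 10 = 4 ∨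
            PySem.Int.mod n 10 = 6 ∨ PySem.Int.mod n 10 = 8 ∨ PySem.Int.mod n 10 = 9 then false
    else primeDigitsFuel fuel (PySem.Int.floordiv n 10)

def prime_digits (n : Int) : Bool := primeDigitsFuel n.natAbs n

-- the body of A's 'for x in lst' loop, acting on the state (rez2, temp2)
def stepA (s : List Int × List Int) (x : Int) : List Int × List Int :=
  if prime_digits x then (s.1, s.2 ++ [x])
  else if s.2.length > s.1.length then (s.2, []) else (s.1, [])

def get_longest_prime_digits (lst : List Int) : List Int :=
  (lst.foldl stepA ([], [])).1

-- ===== PORT B =====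
-- B's prime_digits: same while loop, membership in the prime-digit set (2,3,5,7); fuel as for A
def pdAltFuel : Nat → Int → Bool
  | 0, _ => true
  | fuel+1, n =>
    if n = 0 then true
    else if PySem.Int.mod n 10 = 2 ∨ PySem.Int.mod n 10 = 3 ∨ PySem.Int.mod n 10 = 5 ∨
            PySem.Int.mod n 10 = 7 then pdAltFuel fuel (PySem.Int.floordiv n 10)
    else false

def pd_alt (n : Int) : Bool := pdAltFuel n.natAbs n

-- inner 'while j < len(lst) and prime_digits(lst[j]): j += 1'; fuel = remaining indices
def bFindEndF (lst : List Int) : Nat → Nat → Nat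
  | 0, j => j
  | fuel+1, j =>
    if j < lst.length ∧ pd_alt (lst.getD j 0) then bFindEndF lst fuel (j+1) else j

-- outer 'while i < len(lst)' loop; each iteration advances i by at least 1, so len+1 fuel is exact
def bLoopF (lst : List Int) : Nat → Nat → List Int → List Int
  | 0, _, best => best
  | fuel+1, i, best =>
    if i < lst.length then
      if pd_alt (lst.getD i 0) then
        let j := bFindEndF lst (lst.length - i) i
        bLoopF lst fuel j
          (if j - i > best.length then PySem.List.slice lst (some (i : Int)) (some (j : Int)) else best)
      else bLoopF lst fuel (i+1) best
    else best

def get_longest_prime_digits_alt (lst : List Int) : List Int := bLoopF lst (lst.length + 1) 0 []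

-- ===== PRECONDITION & SPEC =====
-- an independent all-prime-digit test for D_ (no reference to either port)
def pvPD (n : Int) : Bool := decide (0 ≤ n) && (Nat.digits 10 n.toNat).all ([2,3,5,7].contains ·)

-- On lists ending in a prime-digit number — the only inputs where A's never-flushed trailing run
-- can matter — A returns the longest earlier run while B also considers the trailing run and
-- returns it when it is strictly longest, which is the intended result.
def D_get_longest_prime_digits (lst : List Int) : Prop :=
  lst ≠ [] ∧ pvPD (lst.getLast?.getD 0)

instance (lst : List Int) : Decidable (D_get_longest_prime_digits lst) := by
  unfold D_get_longest_prime_digits; infer_instance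

def Spec_get_longest_prime_digits (lst : List Int) (out : List Int) : Prop :=
  ¬ D_get_longest_prime_digits lst → out = get_longest_prime_digits_alt lst
instance (lst : List Int) (out : List Int) : Decidable (Spec_get_longest_prime_digits lst out) := by
  unfold Spec_get_longest_prime_digits; infer_instance

def pvDiffWitness_get_longest_prime_digits : List Int := [2]
def pvDiffWitnessOut_get_longest_prime_digits : (List Int) × (List Int) := ([], [2])

-- ===== CLAIM (what is proved, stated in full; the proofs are below) =====
def Claim_unchanged_get_longest_prime_digits : Prop := ∀ (lst : List Int), Dom_get_longest_prime_digits lst → Spec_get_longest_prime_digits lst (get_longest_prime_digits lst)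
def Claim_changed_get_longest_prime_digits : Prop := Dom_get_longest_prime_digits (pvDiffWitness_get_longest_prime_digits) ∧ D_get_longest_prime_digits (pvDiffWitness_get_longest_prime_digits) ∧ get_longest_prime_digits (pvDiffWitness_get_longest_prime_digits) = pvDiffWitnessOut_get_longest_prime_digits.1 ∧ get_longest_prime_digits_alt (pvDiffWitness_get_longest_prime_digits) = pvDiffWitnessOut_get_longest_prime_digits.2 ∧ pvDiffWitnessOut_get_longest_prime_digits.1 ≠ pvDiffWitnessOut_get_longest_prime_digits.2

-- ===== LEMMAS AND PROOFS =====

-- one digit step shrinks |n| whenever the loop recurses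
theorem pvDigitStep (n : Int) (h0 : n ≠ 0) (h7 : PySem.Int.mod n 10 ≤ 7) :
    (PySem.Int.floordiv n 10).natAbs < n.natAbs := by
  have h1 := PySem.Int.floordiv_mul_add_mod n 10
  have h2 := PySem.Int.mod_nonneg n (b := 10) (by omega)
  omega

theorem pdf_zero (fuel : Nat) : primeDigitsFuel fuel 0 = true := by cases fuel <;> rfl
theorem pdaf_zero (fuel : Nat) : pdAltFuel fuel 0 = true := by cases fuel <;> rfl

theorem pdf_succ_bad (fuel : Nat) (n : Int) (h0 : n ≠ 0)
    (hbad : PySem.Int.mod n 10 = 0 ∨ PySem.Int.mod n 10 = 1 ∨ PySem.Int.mod n 10 = 4 ∨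
      PySem.Int.mod n 10 = 6 ∨ PySem.Int.mod n 10 = 8 ∨ PySem.Int.mod n 10 = 9) :
    primeDigitsFuel (fuel + 1) n = false := by
  simp only [primeDigitsFuel, if_neg h0, if_pos hbad]

theorem pdf_succ_good (fuel : Nat) (n : Int) (h0 : n ≠ 0)
    (hbad : ¬ (PySem.Int.mod n 10 = 0 ∨ PySem.Int.mod n 10 = 1 ∨ PySem.Int.mod n 10 = 4 ∨
      PySem.Int.mod n 10 = 6 ∨ PySem.Int.mod n 10 = 8 ∨ PySem.Int.mod n 10 = 9)) :
    primeDigitsFuel (fuel + 1) n = primeDigitsFuel fuel (PySem.Int.floordiv n 10) := by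
  simp only [primeDigitsFuel, if_neg h0, if_neg hbad]

-- fuel irrelevance for A's digit loop: any fuel of at least |n| computes the same value
theorem pdf_fuel_irrel (f1 : Nat) : ∀ (f2 : Nat) (n : Int), n.natAbs ≤ f1 → n.natAbs ≤ f2 →
    primeDigitsFuel f1 n = primeDigitsFuel f2 n := by
  induction f1 with
  | zero =>
    intro f2 n h1 _
    have : n = 0 := by omega
    subst this
    rw [pdf_zero, pdf_zero]
  | succ f1 ih =>
    intro f2 n h1 h2
    by_cases h0 : n = 0
    · subst h0; rw [pdf_zero, pdf_zero]
    · obtain ⟨f2', rfl⟩ : ∃ k, f2 = k + 1 := ⟨f2 - 1, by omega⟩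
      by_cases hbad : PySem.Int.mod n 10 = 0 ∨ PySem.Int.mod n 10 = 1 ∨ PySem.Int.mod n 10 = 4 ∨
          PySem.Int.mod n 10 = 6 ∨ PySem.Int.mod n 10 = 8 ∨ PySem.Int.mod n 10 = 9
      · rw [pdf_succ_bad f1 n h0 hbad, pdf_succ_bad f2' n h0 hbad]
      · have h3 := PySem.Int.mod_nonneg n (b := 10) (by omega)
        have h4 := PySem.Int.mod_lt n (b := 10) (by omega)
        have hlt := pvDigitStep n h0 (by omega)
        rw [pdf_succ_good f1 n h0 hbad, pdf_succ_good f2' n h0 hbad]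
        exact ih f2' _ (by omega) (by omega)

theorem primeDigitsFuel_eq (fuel : Nat) (n : Int) (h : n.natAbs ≤ fuel) :
    primeDigitsFuel fuel n = prime_digits n :=
  pdf_fuel_irrel fuel n.natAbs n h le_rfl

-- the two digit tests agree: the six-way rejection list is the complement of the prime-digit set
theorem pdAltFuel_eq (fuel : Nat) : ∀ (n : Int), n.natAbs ≤ fuel →
    pdAltFuel fuel n = primeDigitsFuel fuel n := by
  induction fuel with
  | zero => intro n _; rfl
  | succ fuel ih =>
    intro n hn
    by_cases h0 : n = 0
    · subst h0; rw [pdf_zero, pdaf_zero]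
    · have h2 := PySem.Int.mod_nonneg n (b := 10) (by omega)
      have h3 := PySem.Int.mod_lt n (b := 10) (by omega)
      by_cases hp : PySem.Int.mod n 10 = 2 ∨ PySem.Int.mod n 10 = 3 ∨ PySem.Int.mod n 10 = 5 ∨
          PySem.Int.mod n 10 = 7
      · have hbad : ¬ (PySem.Int.mod n 10 = 0 ∨ PySem.Int.mod n 10 = 1 ∨ PySem.Int.mod n 10 = 4 ∨
            PySem.Int.mod n 10 = 6 ∨ PySem.Int.mod n 10 = 8 ∨ PySem.Int.mod n 10 = 9) := by omega
        have hlt := pvDigitStep n h0 (by omega)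
        rw [pdf_succ_good fuel n h0 hbad]
        simp only [pdAltFuel, if_neg h0, if_pos hp]
        exact ih _ (by omega)
      · have hbad : PySem.Int.mod n 10 = 0 ∨ PySem.Int.mod n 10 = 1 ∨ PySem.Int.mod n 10 = 4 ∨
            PySem.Int.mod n 10 = 6 ∨ PySem.Int.mod n 10 = 8 ∨ PySem.Int.mod n 10 = 9 := by omega
        rw [pdf_succ_bad fuel n h0 hbad]
        simp only [pdAltFuel, if_neg h0, if_neg hp]

theorem pd_alt_eq (n : Int) : pd_alt n = prime_digits n := by
  rw [pd_alt, pdAltFuel_eq n.natAbs n le_rfl, primeDigitsFuel_eq n.natAbs n le_rfl]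

-- negative numbers never pass A's digit test (the loop reaches -1, whose last digit reads as 9)
theorem prime_digits_neg (fuel : Nat) : ∀ (n : Int), n < 0 → n.natAbs ≤ fuel →
    primeDigitsFuel fuel n = false := by
  induction fuel with
  | zero => intro n hneg hn; omega
  | succ fuel ih =>
    intro n hneg hn
    have h0 : n ≠ 0 := by omega
    have h1 := PySem.Int.floordiv_mul_add_mod n 10
    have h2 := PySem.Int.mod_nonneg n (b := 10) (by omega)
    have h3 := PySem.Int.mod_lt n (b := 10) (by omega)
    by_cases hbad : PySem.Int.mod n 10 = 0 ∨ PySem.Int.mod n 10 = 1 ∨ PySem.Int.mod n 10 = 4 ∨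
        PySem.Int.mod n 10 = 6 ∨ PySem.Int.mod n 10 = 8 ∨ PySem.Int.mod n 10 = 9
    · exact pdf_succ_bad fuel n h0 hbad
    · have hlt := pvDigitStep n h0 (by omega)
      rw [pdf_succ_good fuel n h0 hbad]
      exact ih _ (by omega) (by omega)

-- on nonnegative input the digit-list test computes A's digit loop
theorem digits_all_eq (fuel : Nat) : ∀ (n : Int), 0 ≤ n → n.natAbs ≤ fuel →
    (Nat.digits 10 n.toNat).all ([2,3,5,7].contains ·) = primeDigitsFuel fuel n := by
  induction fuel with
  | zero =>
    intro n _ h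
    have : n = 0 := by omega
    subst this; rfl
  | succ fuel ih =>
    intro n hpos hn
    by_cases h0 : n = 0
    · subst h0; rw [pdf_zero]; rfl
    · have h1 := PySem.Int.floordiv_mul_add_mod n 10
      have h2 := PySem.Int.mod_nonneg n (b := 10) (by omega)
      have h3 := PySem.Int.mod_lt n (b := 10) (by omega)
      have hq := Nat.div_add_mod n.toNat 10
      have hql := Nat.mod_lt n.toNat (y := 10) (by omega)
      have hdig : Nat.digits 10 n.toNat = n.toNat % 10 :: Nat.digits 10 (n.toNat / 10) :=
        Nat.digits_def' (by norm_num) (by omega)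
      rw [hdig, List.all_cons]
      by_cases hp : n.toNat % 10 = 2 ∨ n.toNat % 10 = 3 ∨ n.toNat % 10 = 5 ∨ n.toNat % 10 = 7
      · have hc : [2,3,5,7].contains (n.toNat % 10) = true := by
          rcases hp with h|h|h|h <;> rw [h] <;> rfl
        have hbad : ¬ (PySem.Int.mod n 10 = 0 ∨ PySem.Int.mod n 10 = 1 ∨ PySem.Int.mod n 10 = 4 ∨
            PySem.Int.mod n 10 = 6 ∨ PySem.Int.mod n 10 = 8 ∨ PySem.Int.mod n 10 = 9) := by omega
        have hlt := pvDigitStep n h0 (by omega)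
        rw [pdf_succ_good fuel n h0 hbad, hc, Bool.true_and]
        have := ih (PySem.Int.floordiv n 10) (by omega) (by omega)
        rwa [show (PySem.Int.floordiv n 10).toNat = n.toNat / 10 by omega] at this
      · have hc : [2,3,5,7].contains (n.toNat % 10) = false := by
          simp only [List.contains_eq_mem, List.mem_cons, List.not_mem_nil, or_false,
            decide_eq_false_iff_not]
          omega
        have hbad : PySem.Int.mod n 10 = 0 ∨ PySem.Int.mod n 10 = 1 ∨ PySem.Int.mod n 10 = 4 ∨
            PySem.Int.mod n 10 = 6 ∨ PySem.Int.mod n 10 = 8 ∨ PySem.Int.mod n 10 = 9 := by omega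
        rw [pdf_succ_bad fuel n h0 hbad, hc, Bool.false_and]

theorem pvPD_eq (n : Int) : pvPD n = prime_digits n := by
  by_cases h : 0 ≤ n
  · rw [pvPD, prime_digits, ← digits_all_eq n.natAbs n h le_rfl]
    simp [h]
  · rw [pvPD, prime_digits, prime_digits_neg n.natAbs n (by omega) le_rfl]
    simp [h]

-- 'keep the longer, prefer the incumbent on ties' — the flush rule of both programs
def pick (rez t : List Int) : List Int := if t.length > rez.length then t else rez

-- the maximal prime-digit runs of xs, with temp the run currently being accumulated
def runsFrom (temp : List Int) : List Int → List (List Int)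
  | [] => if temp = [] then [] else [temp]
  | x :: xs =>
    if prime_digits x then runsFrom (temp ++ [x]) xs
    else if temp = [] then runsFrom [] xs else temp :: runsFrom [] xs

theorem runsFrom_ne (xs : List Int) : ∀ (temp : List Int), temp ≠ [] →
    runsFrom temp xs =
      (temp ++ xs.takeWhile prime_digits) :: runsFrom [] (xs.dropWhile prime_digits) := by
  induction xs with
  | nil => intro temp h; simp [runsFrom, h]
  | cons x xs ih =>
    intro temp h
    by_cases hp : prime_digits x
    · rw [List.takeWhile_cons_of_pos hp, List.dropWhile_cons_of_pos hp]
      simp only [runsFrom, if_pos hp]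
      rw [ih (temp ++ [x]) (by simp)]
      simp
    · rw [List.takeWhile_cons_of_neg hp, List.dropWhile_cons_of_neg hp]
      simp [runsFrom, hp, h]

theorem take_len_takeWhile (p : Int → Bool) (l : List Int) :
    l.take (l.takeWhile p).length = l.takeWhile p := by
  induction l with
  | nil => rfl
  | cons x xs ih =>
    by_cases hp : p x
    · rw [List.takeWhile_cons_of_pos hp]; simpa using ih
    · rw [List.takeWhile_cons_of_neg hp]; rfl

theorem drop_len_takeWhile (p : Int → Bool) (l : List Int) :
    l.drop (l.takeWhile p).length = l.dropWhile p := by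
  induction l with
  | nil => rfl
  | cons x xs ih =>
    by_cases hp : p x
    · rw [List.takeWhile_cons_of_pos hp, List.dropWhile_cons_of_pos hp]; simpa using ih
    · rw [List.takeWhile_cons_of_neg hp, List.dropWhile_cons_of_neg hp]; rfl

-- the inner while loop finds the end of the current maximal run
theorem bFindEndF_char (lst : List Int) (fuel : Nat) : ∀ (j : Nat), lst.length - j ≤ fuel →
    bFindEndF lst fuel j = j + ((lst.drop j).takeWhile prime_digits).length := by
  induction fuel with
  | zero =>
    intro j hj
    rw [List.drop_eq_nil_of_le (by omega)]
    rfl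
  | succ fuel ih =>
    intro j hj
    by_cases hlt : j < lst.length
    · have hd : lst.drop j = lst[j] :: lst.drop (j+1) := List.drop_eq_getElem_cons hlt
      have hgd : lst.getD j 0 = lst[j] := List.getD_eq_getElem lst 0 hlt
      by_cases hp : prime_digits lst[j]
      · have hc : j < lst.length ∧ pd_alt (lst.getD j 0) = true := by
          rw [hgd, pd_alt_eq]; exact ⟨hlt, hp⟩
        simp only [bFindEndF, if_pos hc]
        rw [ih (j+1) (by omega), hd, List.takeWhile_cons_of_pos hp]
        simp; omega
      · have hc : ¬ (j < lst.length ∧ pd_alt (lst.getD j 0) = true) := by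
          rw [hgd, pd_alt_eq]; simp [hp]
        simp only [bFindEndF, if_neg hc]
        rw [hd, List.takeWhile_cons_of_neg (by simp [hp])]
        rfl
    · have hc : ¬ (j < lst.length ∧ pd_alt (lst.getD j 0) = true) := by simp [hlt]
      simp only [bFindEndF, if_neg hc]
      rw [List.drop_eq_nil_of_le (by omega)]
      rfl

-- the outer loop folds pick over the maximal runs of the remaining suffix
theorem bLoopF_char (lst : List Int) (fuel : Nat) :
    ∀ (i : Nat) (best : List Int), lst.length + 1 - i ≤ fuel →
    bLoopF lst fuel i best = List.foldl pick best (runsFrom [] (lst.drop i)) := by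
  induction fuel with
  | zero =>
    intro i best hi
    rw [List.drop_eq_nil_of_le (by omega)]
    rfl
  | succ fuel ih =>
    intro i best hi
    by_cases hlt : i < lst.length
    · have hd : lst.drop i = lst[i] :: lst.drop (i+1) := List.drop_eq_getElem_cons hlt
      have hgd : lst.getD i 0 = lst[i] := List.getD_eq_getElem lst 0 hlt
      by_cases hp : prime_digits lst[i]
      · have hpa : pd_alt (lst.getD i 0) = true := by rw [hgd, pd_alt_eq]; exact hp
        have htw : (lst.drop i).takeWhile prime_digits =
            lst[i] :: (lst.drop (i+1)).takeWhile prime_digits := by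
          rw [hd, List.takeWhile_cons_of_pos hp]
        set tw := (lst.drop i).takeWhile prime_digits with htwdef
        have hj : bFindEndF lst (lst.length - i) i = i + tw.length :=
          bFindEndF_char lst (lst.length - i) i le_rfl
        have htwlen : 1 ≤ tw.length := by rw [htw]; simp
        have hslice : PySem.List.slice lst (some ((i : Nat) : Int))
            (some (((i + tw.length : Nat)) : Int)) = tw := by
          rw [PySem.List.slice_natCast, show i + tw.length - i = tw.length from by omega,
            htwdef, take_len_takeWhile]
        have hdropj : lst.drop (i + tw.length) = (lst.drop i).dropWhile prime_digits := by
          rw [← List.drop_drop, htwdef, drop_len_takeWhile]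
        have hrf : runsFrom [] (lst.drop i) =
            tw :: runsFrom [] ((lst.drop i).dropWhile prime_digits) := by
          rw [hd, List.dropWhile_cons_of_pos hp]
          simp only [runsFrom, if_pos hp]
          rw [List.nil_append, runsFrom_ne _ [lst[i]] (by simp), htw]
          simp
        have hbest : (if i + tw.length - i > best.length then
            PySem.List.slice lst (some ((i : Nat) : Int)) (some (((i + tw.length : Nat)) : Int))
            else best) = pick best tw := by
          rw [show i + tw.length - i = tw.length from by omega, hslice, pick]
        simp only [bLoopF, if_pos hlt, if_pos hpa, hj, hbest]
        rw [ih (i + tw.length) (pick best tw) (by omega), hdropj, hrf, List.foldl_cons]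
      · have hpa : ¬ pd_alt (lst.getD i 0) = true := by rw [hgd, pd_alt_eq]; simp [hp]
        simp only [bLoopF, if_pos hlt, if_neg hpa]
        rw [ih (i+1) best (by omega), hd]
        simp [runsFrom, hp]
    · simp only [bLoopF, if_neg hlt]
      rw [List.drop_eq_nil_of_le (by omega)]
      rfl

-- A's fold, seen through pick/runsFrom: B's result is A's result updated with A's pending run
theorem bridge (xs : List Int) : ∀ (temp rez : List Int),
    List.foldl pick rez (runsFrom temp xs) =
      pick (xs.foldl stepA (rez, temp)).1 (xs.foldl stepA (rez, temp)).2 := by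
  induction xs with
  | nil =>
    intro temp rez
    by_cases h : temp = []
    · subst h; simp [runsFrom, pick]
    · simp [runsFrom, h]
  | cons x xs ih =>
    intro temp rez
    by_cases hp : prime_digits x
    · simp only [runsFrom, List.foldl_cons, stepA, if_pos hp]
      exact ih (temp ++ [x]) rez
    · have hstep : stepA (rez, temp) x = (pick rez temp, []) := by
        simp only [stepA, if_neg hp, pick]
        split <;> rfl
      by_cases h : temp = []
      · subst h
        have : pick rez [] = rez := by simp [pick]
        simp only [runsFrom, if_neg hp, List.foldl_cons, hstep, this]
        exact ih [] rez
      · simp only [runsFrom, if_neg hp, if_neg h, List.foldl_cons, hstep]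
        exact ih [] (pick rez temp)

-- a nonempty pending run at the end of A's fold forces a prime-digit last element
theorem temp_final (xs : List Int) : ∀ (rez temp : List Int),
    (xs.foldl stepA (rez, temp)).2 ≠ [] →
    (xs = [] ∧ temp ≠ []) ∨ ∃ h : xs ≠ [], prime_digits (xs.getLast h) := by
  induction xs with
  | nil => intro rez temp h; exact Or.inl ⟨rfl, h⟩
  | cons x xs ih =>
    intro rez temp h
    rw [List.foldl_cons] at h
    rcases ih _ _ h with ⟨hnil, htemp⟩ | ⟨hne, hlast⟩
    · subst hnil
      by_cases hp : prime_digits x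
      · exact Or.inr ⟨List.cons_ne_nil x [], by simpa using hp⟩
      · exfalso
        apply htemp
        show (stepA (rez, temp) x).2 = []
        unfold stepA
        rw [if_neg hp]
        split <;> rfl
    · refine Or.inr ⟨List.cons_ne_nil x xs, ?_⟩
      rw [List.getLast_cons hne]
      exact hlast

-- KEY: B = pick A (trailing pending run of A's fold)
theorem key (lst : List Int) :
    get_longest_prime_digits_alt lst =
      pick (lst.foldl stepA ([], [])).1 (lst.foldl stepA ([], [])).2 := by
  rw [get_longest_prime_digits_alt, bLoopF_char lst (lst.length + 1) 0 [] (by omega)]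
  simpa using bridge lst [] []

-- ===== VERDICT (by name: the statement is the Claim_ definition above) =====
theorem get_longest_prime_digits_spec : Claim_unchanged_get_longest_prime_digits := by
  intro lst _ hnd
  have hT : (lst.foldl stepA ([], [])).2 = [] := by
    by_contra hne
    rcases temp_final lst [] [] hne with ⟨_, htemp⟩ | ⟨hne', hlast⟩
    · exact htemp rfl
    · refine hnd ?_
      unfold D_get_longest_prime_digits
      refine ⟨hne', ?_⟩
      have hl : lst.getLast? = some (lst.getLast hne') := List.getLast?_eq_some_getLast hne'
      rw [hl, Option.getD_some, pvPD_eq]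
      exact hlast
  rw [key lst, hT, pick, get_longest_prime_digits]
  rw [if_neg (by simp)]

theorem get_longest_prime_digits_changed : Claim_changed_get_longest_prime_digits := by
  unfold Claim_changed_get_longest_prime_digits; decide
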